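-- pv_equiv track=rewrite | github.com/billowdev/basic-ai-algorithm | test/dfs.py | extend_all_DFS
-- ===== SOURCE A (Python) =====
-- def extend_all_DFS(path, nextStates, V):
--     if len(nextStates) < 1:
--         return []
--     elif nextStates[0] in path:
--         nextStates.pop(0)
--         return extend_all_DFS(path, nextStates, V)
--     elif nextStates[0] in V:
--         nextStates.pop(0)
--         return extend_all_DFS(path, nextStates, V)
--     else:
--         x = nextStates.pop(0)
--         V.append(x)
--         return [[x]+path] + extend_all_DFS(path, nextStates, V)
-- ===== SOURCE B (Python) =====
-- def extend_all_DFS(path, nextStates, V):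
--     # Iterative drain of nextStates with an accumulator; same side effects
--     # (nextStates emptied, accepted states appended to V) as the recursion.
--     result = []
--     while nextStates:
--         x = nextStates.pop(0)
--         if x in path or x in V:
--             continue
--         V.append(x)
--         result.append([x] + path)
--     return result
-- ===== Notes on version B (the rewrite author's own statement) =====
-- stated objective: idiomatic
-- what changed: Replaced the tail recursion over nextStates with an explicit while-loop that drains the list into a result accumulator, keeping the same membership tests and the same mutations of nextStates and V.
import Mathlib
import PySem

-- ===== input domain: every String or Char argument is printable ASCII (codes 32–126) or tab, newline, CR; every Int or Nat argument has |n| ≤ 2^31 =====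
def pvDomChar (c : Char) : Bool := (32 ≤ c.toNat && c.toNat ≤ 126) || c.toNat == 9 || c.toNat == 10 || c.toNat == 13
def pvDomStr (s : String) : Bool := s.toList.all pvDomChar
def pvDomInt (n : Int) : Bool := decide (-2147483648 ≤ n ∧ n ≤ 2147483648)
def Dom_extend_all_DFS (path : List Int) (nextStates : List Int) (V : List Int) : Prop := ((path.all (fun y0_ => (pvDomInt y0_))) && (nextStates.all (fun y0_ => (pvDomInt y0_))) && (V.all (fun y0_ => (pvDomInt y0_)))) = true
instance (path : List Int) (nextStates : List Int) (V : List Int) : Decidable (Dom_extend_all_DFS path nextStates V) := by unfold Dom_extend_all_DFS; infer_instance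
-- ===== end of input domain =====

-- B replaces A's tail recursion by an explicit loop draining nextStates into an
-- accumulator; equivalence is about the RETURN value (both Pythons mutate
-- nextStates and V identically).

-- ===== PORT A =====
-- A: recursion on nextStates; pop(0) = recurse on the tail, V.append(x) = recurse on V ++ [x].
def extend_all_DFS (path : List Int) (nextStates : List Int) (V : List Int) : List (List Int) :=
  match nextStates with
  | [] => []
  | x :: rest =>
    if x ∈ path then
      extend_all_DFS path rest V
    else if x ∈ V then
      extend_all_DFS path rest V
    else
      [x :: path] ++ extend_all_DFS path rest (V ++ [x])

-- ===== PORT B =====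
-- B: while-loop over nextStates with state (V, result); `continue` = same state.
def extendAllDFSLoop (path : List Int) : List Int → List Int → List (List Int) → List (List Int)
  | [], _, result => result
  | x :: rest, V, result =>
    if x ∈ path ∨ x ∈ V then
      extendAllDFSLoop path rest V result
    else
      extendAllDFSLoop path rest (V ++ [x]) (result ++ [x :: path])

def extend_all_DFS_alt (path : List Int) (nextStates : List Int) (V : List Int) : List (List Int) :=
  extendAllDFSLoop path nextStates V []

-- ===== PRECONDITION & SPEC =====
def Spec_extend_all_DFS (path : List Int) (nextStates : List Int) (V : List Int) (out : List (List Int)) : Prop := out = extend_all_DFS_alt path nextStates V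
instance (path : List Int) (nextStates : List Int) (V : List Int) (out : List (List Int)) : Decidable (Spec_extend_all_DFS path nextStates V out) := by unfold Spec_extend_all_DFS; infer_instance

-- ===== CLAIM (what is proved, stated in full; the proofs are below) =====
def Claim_equal_extend_all_DFS : Prop := ∀ (path : List Int) (nextStates : List Int) (V : List Int), Dom_extend_all_DFS path nextStates V → Spec_extend_all_DFS path nextStates V (extend_all_DFS path nextStates V)

-- ===== LEMMAS AND PROOFS =====
-- Loop invariant: the accumulator is a prefix of the final result.
theorem extendAllDFSLoop_acc (path : List Int) (ns : List Int) :
    ∀ (V : List Int) (acc : List (List Int)),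
      extendAllDFSLoop path ns V acc = acc ++ extend_all_DFS path ns V := by
  induction ns with
  | nil => intro V acc; simp [extendAllDFSLoop, extend_all_DFS]
  | cons x rest ih =>
    intro V acc
    by_cases hp : x ∈ path
    · simp [extendAllDFSLoop, extend_all_DFS, hp, ih]
    · by_cases hv : x ∈ V
      · simp [extendAllDFSLoop, extend_all_DFS, hp, hv, ih]
      · simp [extendAllDFSLoop, extend_all_DFS, hp, hv, ih]

-- ===== VERDICT (by name: the statement is the Claim_ definition above) =====
theorem extend_all_DFS_spec : Claim_equal_extend_all_DFS := by
  intro path ns V _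
  unfold Spec_extend_all_DFS extend_all_DFS_alt
  simp [extendAllDFSLoop_acc]
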